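-- pv_equiv track=rewrite | github.com/redotter84/inorganic-reactions-predictor | compound/o/oH.py | oHAe_create
-- ===== SOURCE A (Python) =====
-- def oHAe_create(n: int, p=1) -> (str):
--     if n == 2:
--         return "CH2=CH2"
--
--     res: str
--     if p == 1:
--         res = "CH2="
--     else:
--         res = "CH3-"
--
--     for i in range(2, n):
--         if i == p:
--             res += "CH="
--         else:
--             if res[-1] == "=":
--                 res += "CH-"
--             else:
--                 res += "CH2-"
--         n -= 1
--
--     if res[-1] == "=":
--         res += "CH2"
--     else:
--         res += "CH3"
--     return res
-- ===== SOURCE B (Python) =====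
-- def oHAe_create(n: int, p=1) -> (str):
--     if n == 2:
--         return "CH2=CH2"
--     k = n if n > 2 else 2
--     h = [3] + [2] * (k - 2) + [3]      # hydrogens per carbon of the saturated chain
--     c = ["-"] * (k - 1)                # connectors between consecutive carbons
--     if 1 <= p <= k - 1:                # double bond between carbons p and p+1
--         h[p - 1] -= 1
--         h[p] -= 1
--         c[p - 1] = "="
--     segs = ["CH" + ("" if x == 1 else str(x)) for x in h]
--     return "".join(s + d for s, d in zip(segs, c)) + segs[-1]
-- ===== Notes on version B (the rewrite author's own statement) =====
-- stated objective: alternative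
-- what changed: Replaces A's stateful left-to-right emitter (branching on the last character of the string built so far, with n mutated inside the loop) by a two-stage build: first the saturated alkane skeleton as a list of hydrogen counts plus single-bond connectors, then an arithmetic patch (decrement H on carbons p and p+1, set connector p to '='), then render and join.
import Mathlib
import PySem

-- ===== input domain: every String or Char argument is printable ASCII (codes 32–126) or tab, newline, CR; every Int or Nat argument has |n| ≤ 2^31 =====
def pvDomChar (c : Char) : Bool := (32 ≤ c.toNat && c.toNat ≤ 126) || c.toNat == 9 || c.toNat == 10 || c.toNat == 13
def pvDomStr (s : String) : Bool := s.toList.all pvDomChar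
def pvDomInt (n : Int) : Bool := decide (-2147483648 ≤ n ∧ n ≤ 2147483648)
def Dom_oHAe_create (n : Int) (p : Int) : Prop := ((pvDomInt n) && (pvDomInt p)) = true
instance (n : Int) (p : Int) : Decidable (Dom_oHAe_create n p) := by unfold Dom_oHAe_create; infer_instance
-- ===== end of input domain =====

-- B replaces A's stateful left-to-right emitter (branch on the last character of the string so far)
-- by a two-stage build: saturated-skeleton lists (hydrogen counts + connectors), an arithmetic
-- double-bond patch, then render and join; objective: alternative.

-- ===== PORT A =====
-- loop body of A: state is (res, n); 'res += …' branching on res[-1], then 'n -= 1'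
def pvStepA (p : Int) (st : String × Int) (i : Int) : String × Int :=
  (if i = p then st.1 ++ "CH="
   else if PySem.Str.pyGet? st.1 (-1) = some '=' then st.1 ++ "CH-"
   else st.1 ++ "CH2-", st.2 - 1)

def oHAe_create (n : Int) (p : Int) : String :=
  if n = 2 then "CH2=CH2"
  else
    let res0 : String := if p = 1 then "CH2=" else "CH3-"
    let st := (PySem.List.pyRange 2 n 1).foldl (pvStepA p) (res0, n)
    if PySem.Str.pyGet? st.1 (-1) = some '=' then st.1 ++ "CH2" else st.1 ++ "CH3"

-- ===== PORT B =====
-- '"CH" + ("" if x == 1 else str(x))'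
def pvRender (x : Int) : String :=
  "CH" ++ (if x = 1 then "" else PySem.Int.toStr x)

def oHAe_create_alt (n : Int) (p : Int) : String :=
  if n = 2 then "CH2=CH2"
  else
    let k : Int := if 2 < n then n else 2
    let h0 : List Int := [3] ++ List.replicate (k - 2).toNat 2 ++ [3]
    let c0 : List String := List.replicate (k - 1).toNat "-"
    -- 'h[p-1] -= 1; h[p] -= 1; c[p-1] = "="': the guard puts all three indices in range,
    -- so List.set / pyGet?.getD are exact here
    let hc : List Int × List String :=
      if 1 ≤ p ∧ p ≤ k - 1 then
        let h1 := h0.set (p - 1).toNat ((PySem.List.pyGet? h0 (p - 1)).getD 0 - 1)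
        let h2 := h1.set p.toNat ((PySem.List.pyGet? h1 p).getD 0 - 1)
        (h2, c0.set (p - 1).toNat "=")
      else (h0, c0)
    let segs : List String := hc.1.map pvRender
    -- 'segs[-1]': segs is never empty, so the default is never used
    PySem.Str.join "" ((segs.zip hc.2).map (fun sd => sd.1 ++ sd.2))
      ++ (PySem.List.pyGet? segs (-1)).getD ""

-- ===== PRECONDITION & SPEC =====
def Spec_oHAe_create (n : Int) (p : Int) (out : String) : Prop := out = oHAe_create_alt n p
instance (n : Int) (p : Int) (out : String) : Decidable (Spec_oHAe_create n p out) := by unfold Spec_oHAe_create; infer_instance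

-- ===== CLAIM (what is proved, stated in full; the proofs are below) =====
def Claim_equal_oHAe_create : Prop := ∀ (n : Int) (p : Int), Dom_oHAe_create n p → Spec_oHAe_create n p (oHAe_create n p)

-- ===== LEMMAS AND PROOFS =====

-- the segment A emits for loop index i, as a function of i and p alone
def pvPiece (p : Int) (i : Int) : String :=
  if i = p then "CH=" else if i - 1 = p then "CH-" else "CH2-"

-- per-carbon target: carbon j (0-based, of m+2 carbons) together with its following connector
def pvG (p : Int) (m : Nat) (j : Nat) : List Char :=
  if j = 0 then (if p = 1 then "CH2=" else ("CH3-" : String)).toList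
  else if j = m + 1 then (if p = (m : Int) + 1 then "CH2" else ("CH3" : String)).toList
  else (pvPiece p ((j : Int) + 1)).toList

-- B's hydrogen count / connector at 0-based index j, as functions of the index
def pvHf (p : Int) (m : Nat) (j : Nat) : Int :=
  (if j = 0 ∨ j = m + 1 then 3 else 2) -
    (if (1 ≤ p ∧ p ≤ (m : Int) + 1) ∧ ((j : Int) = p - 1 ∨ (j : Int) = p) then 1 else 0)

def pvCf (p : Int) (m : Nat) (j : Nat) : String :=
  if (1 ≤ p ∧ p ≤ (m : Int) + 1) ∧ (j : Int) = p - 1 then "=" else "-"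

-- ''.join is concatenation
lemma pvJoinNil (l : List (List Char)) : PySem.Chars.join [] l = l.flatten := by
  induction l with
  | nil => simp [PySem.Chars.join_nil]
  | cons a t ih =>
    cases t with
    | nil => simp [PySem.Chars.join_singleton]
    | cons b r => simpa [PySem.Chars.join_cons_cons] using ih

-- loop invariant: after processing range(2, 2+k) A's string is the head plus the index pieces,
-- and its last character is '=' exactly when p = 1+k (the double bond sits at the end)
lemma pvInv (p : Int) (m : Int) (k : Nat) :
    (((PySem.List.pyRange 2 (2 + (k : Int)) 1).foldl (pvStepA p)
        ((if p = 1 then "CH2=" else "CH3-"), m)).1).toList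
      = (if p = 1 then "CH2=" else ("CH3-" : String)).toList
        ++ (((PySem.List.pyRange 2 (2 + (k : Int)) 1).map (pvPiece p)).map String.toList).flatten
  ∧ (((PySem.List.pyRange 2 (2 + (k : Int)) 1).foldl (pvStepA p)
        ((if p = 1 then "CH2=" else "CH3-"), m)).1).toList.getLast?
      = some (if p = 1 + (k : Int) then '=' else '-') := by
  induction k with
  | zero =>
    rw [PySem.List.pyRange_one_eq_nil (by norm_num)]
    by_cases hp : p = 1 <;> simp [hp]
  | succ k ih =>
    obtain ⟨ih1, ih2⟩ := ih
    have hsplit : PySem.List.pyRange 2 (2 + ((k + 1 : Nat) : Int)) 1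
        = PySem.List.pyRange 2 (2 + (k : Int)) 1 ++ [2 + (k : Int)] := by
      have : (2 + ((k + 1 : Nat) : Int)) = (2 + (k : Int)) + 1 := by push_cast; ring
      rw [this, PySem.List.pyRange_one_succ_right (by omega)]
    have hlast : PySem.Str.pyGet?
        (((PySem.List.pyRange 2 (2 + (k : Int)) 1).foldl (pvStepA p)
          ((if p = 1 then "CH2=" else "CH3-"), m)).1) (-1)
        = some (if p = 1 + (k : Int) then '=' else '-') := by
      simp [PySem.List.pyGet?_neg_one, ih2]
    by_cases hi : 2 + (k : Int) = p
    · have hp1 : pvPiece p (2 + (k : Int)) = "CH=" := by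
        unfold pvPiece; rw [if_pos hi]
      have hnew : p = 1 + ((k + 1 : Nat) : Int) := by omega
      rw [hsplit]
      constructor
      · rw [List.foldl_append, List.foldl_cons, List.foldl_nil]
        rw [pvStepA]
        rw [if_pos hi]
        simp [ih1, hp1]
      · rw [List.foldl_append, List.foldl_cons, List.foldl_nil]
        rw [pvStepA]
        rw [if_pos hi, if_pos hnew]
        simp [List.getLast?_append]
    · have hnew : ¬ p = 1 + ((k + 1 : Nat) : Int) := by omega
      by_cases hc : p = 1 + (k : Int)
      · have hp1 : pvPiece p (2 + (k : Int)) = "CH-" := by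
          unfold pvPiece; rw [if_neg hi, if_pos (by omega)]
        rw [hsplit]
        constructor
        · rw [List.foldl_append, List.foldl_cons, List.foldl_nil]
          rw [pvStepA]
          rw [if_neg hi, hlast, if_pos hc, if_pos rfl]
          simp [ih1, hp1]
        · rw [List.foldl_append, List.foldl_cons, List.foldl_nil]
          rw [pvStepA]
          rw [if_neg hi, hlast, if_pos hc, if_pos rfl, if_neg hnew]
          simp [List.getLast?_append]
      · have hp1 : pvPiece p (2 + (k : Int)) = "CH2-" := by
          unfold pvPiece; rw [if_neg hi, if_neg (by omega)]
        rw [hsplit]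
        constructor
        · rw [List.foldl_append, List.foldl_cons, List.foldl_nil]
          rw [pvStepA]
          rw [if_neg hi, hlast, if_neg hc, if_neg (by decide)]
          simp [ih1, hp1]
        · rw [List.foldl_append, List.foldl_cons, List.foldl_nil]
          rw [pvStepA]
          rw [if_neg hi, hlast, if_neg hc, if_neg (by decide), if_neg hnew]
          simp [List.getLast?_append]

-- skeleton lookup: the saturated chain has 3 hydrogens at the ends, 2 in the middle
lemma pvSkelGet (m j : Nat) (hj : j < m + 2) :
    (([3] ++ List.replicate m 2 ++ [3] : List Int))[j]'(by simp; omega)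
      = if j = 0 ∨ j = m + 1 then 3 else 2 := by
  simp only [List.getElem_append, List.length_cons, List.length_nil, List.length_replicate,
    List.length_append, List.getElem_replicate, List.getElem_singleton]
  split_ifs <;> first | rfl | omega

-- A on n = 2+m (m ≥ 1) equals the per-carbon target
lemma pvA_char (p : Int) (m : Nat) (hm : 1 ≤ m) :
    (oHAe_create (2 + (m : Int)) p).toList = ((List.range (m + 2)).map (pvG p m)).flatten := by
  obtain ⟨i1, i2⟩ := pvInv p (2 + (m : Int)) m
  have hlast : PySem.Str.pyGet?
      (((PySem.List.pyRange 2 (2 + (m : Int)) 1).foldl (pvStepA p)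
        ((if p = 1 then "CH2=" else "CH3-"), 2 + (m : Int))).1) (-1)
      = some (if p = 1 + (m : Int) then '=' else '-') := by
    simp [PySem.List.pyGet?_neg_one, i2]
  have hmid : ((PySem.List.pyRange 2 (2 + (m : Int)) 1).map (pvPiece p)).map String.toList
      = (List.range m).map (fun j => pvG p m (j + 1)) := by
    rw [PySem.List.pyRange_one, show ((2 : Int) + (m : Int) - 2).toNat = m by omega]
    simp only [List.map_map]
    refine List.map_congr_left ?_
    intro j hj
    rw [List.mem_range] at hj
    simp only [Function.comp]
    rw [pvG, if_neg (by omega), if_neg (by omega)]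
    congr 2
    push_cast; ring
  have hflat : ((List.range (m + 2)).map (pvG p m)).flatten
      = pvG p m 0 ++ (((List.range m).map (fun j => pvG p m (j + 1))).flatten ++ pvG p m (m + 1)) := by
    rw [show m + 2 = (m + 1) + 1 from rfl, List.range_succ, List.range_succ_eq_map]
    simp [Function.comp_def, Nat.succ_eq_add_one]
  have hG0 : pvG p m 0 = (if p = 1 then "CH2=" else ("CH3-" : String)).toList := by
    rw [pvG, if_pos rfl]
  rw [hflat]
  simp only [oHAe_create]
  rw [if_neg (by omega : ¬ ((2 : Int) + (m : Int) = 2))]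
  rw [hlast]
  by_cases hp : p = 1 + (m : Int)
  · rw [if_pos (by rw [if_pos hp])]
    have hGl : pvG p m (m + 1) = ("CH2" : String).toList := by
      rw [pvG, if_neg (by omega), if_pos rfl, if_pos (by omega)]
    rw [String.toList_append, i1, hmid, hGl, ← hG0, List.append_assoc]
  · rw [if_neg (by rw [if_neg hp]; decide)]
    have hGl : pvG p m (m + 1) = ("CH3" : String).toList := by
      rw [pvG, if_neg (by omega), if_pos rfl, if_neg (by omega)]
    rw [String.toList_append, i1, hmid, hGl, ← hG0, List.append_assoc]

-- in-range non-negative indexing via pyGet?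
lemma pvGetNat (l : List Int) (i : Int) (h0 : 0 ≤ i) (h1 : i.toNat < l.length) :
    (PySem.List.pyGet? l i).getD 0 = l[i.toNat]'h1 := by
  obtain ⟨k, rfl⟩ : ∃ k : Nat, i = (k : Int) := ⟨i.toNat, by omega⟩
  rw [PySem.List.pyGet?_natCast]
  simp [List.getElem?_eq_getElem (by simpa using h1)]
  rfl

-- B's patched lists are exactly the index functions pvHf / pvCf
lemma pvH_char (p : Int) (m : Nat) :
    (if 1 ≤ p ∧ p ≤ 2 + (m : Int) - 1 then
        ((([3] ++ List.replicate m 2 ++ [3] : List Int).set (p - 1).toNat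
              ((PySem.List.pyGet? ([3] ++ List.replicate m 2 ++ [3] : List Int) (p - 1)).getD 0 - 1)).set
            p.toNat
            ((PySem.List.pyGet?
                  (([3] ++ List.replicate m 2 ++ [3] : List Int).set (p - 1).toNat
                    ((PySem.List.pyGet? ([3] ++ List.replicate m 2 ++ [3] : List Int) (p - 1)).getD 0 - 1))
                  p).getD 0 - 1),
          (List.replicate (m + 1) "-").set (p - 1).toNat "=")
      else ([3] ++ List.replicate m 2 ++ [3], List.replicate (m + 1) "-"))
    = ((List.range (m + 2)).map (pvHf p m), (List.range (m + 1)).map (pvCf p m)) := by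
  by_cases hb : 1 ≤ p ∧ p ≤ 2 + (m : Int) - 1
  · rw [if_pos hb]
    have hg1 : (PySem.List.pyGet? ([3] ++ List.replicate m 2 ++ [3] : List Int) (p - 1)).getD 0
        = if (p - 1).toNat = 0 then 3 else 2 := by
      rw [pvGetNat _ _ (by omega) (by simp; omega), pvSkelGet m _ (by omega)]
      split_ifs <;> omega
    have hg2 : (PySem.List.pyGet?
          (([3] ++ List.replicate m 2 ++ [3] : List Int).set (p - 1).toNat
            ((PySem.List.pyGet? ([3] ++ List.replicate m 2 ++ [3] : List Int) (p - 1)).getD 0 - 1))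
          p).getD 0 = if p.toNat = m + 1 then 3 else 2 := by
      rw [pvGetNat _ _ (by omega) (by simp; omega)]
      rw [List.getElem_set, if_neg (by omega : ¬ (p - 1).toNat = p.toNat)]
      rw [pvSkelGet m _ (by omega)]
      split_ifs <;> omega
    rw [hg2, hg1]
    refine Prod.ext ?_ ?_
    · apply List.ext_getElem
      · simp
      intro j hj hj'
      have hjm : j < m + 2 := by simp at hj; omega
      simp only [List.getElem_map, List.getElem_range]
      rw [List.getElem_set, List.getElem_set, pvSkelGet m j hjm, pvHf]
      split_ifs <;> omega
    · apply List.ext_getElem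
      · simp
      intro j hj hj'
      simp only [List.getElem_set, List.getElem_replicate, List.getElem_map, List.getElem_range]
      rw [pvCf]
      split_ifs <;> first | rfl | omega | exact (False.elim ‹False›)
  · rw [if_neg hb]
    refine Prod.ext ?_ ?_
    · apply List.ext_getElem
      · simp
      intro j hj hj'
      have hjm : j < m + 2 := by simp at hj; omega
      simp only [List.getElem_map, List.getElem_range]
      rw [pvSkelGet m j hjm, pvHf]
      split_ifs <;> omega
    · apply List.ext_getElem
      · simp
      intro j hj hj'
      simp only [List.getElem_replicate, List.getElem_map, List.getElem_range]
      rw [pvCf]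
      split_ifs <;> first | rfl | omega | exact (False.elim ‹False›)

-- a rendered carbon and its connector equal the target piece, index by index
lemma pvGB_mid (p : Int) (m : Nat) (j : Nat) (hj : j < m + 1) :
    (pvRender (pvHf p m j) ++ pvCf p m j).toList = pvG p m j := by
  by_cases hj0 : j = 0
  · subst hj0
    by_cases hp : p = 1
    · have hH : pvHf p m 0 = 2 := by rw [pvHf]; split_ifs <;> omega
      have hC : pvCf p m 0 = "=" := by
        rw [pvCf]; split_ifs <;> first | rfl | omega | exact (False.elim ‹False›)
      have hG : pvG p m 0 = ("CH2=" : String).toList := by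
        rw [pvG]; split_ifs <;> first | rfl | omega | exact (False.elim ‹False›)
      rw [hH, hC, hG]; decide
    · have hH : pvHf p m 0 = 3 := by rw [pvHf]; split_ifs <;> omega
      have hC : pvCf p m 0 = "-" := by
        rw [pvCf]; split_ifs <;> first | rfl | omega | exact (False.elim ‹False›)
      have hG : pvG p m 0 = ("CH3-" : String).toList := by
        rw [pvG]; split_ifs <;> first | rfl | omega | exact (False.elim ‹False›)
      rw [hH, hC, hG]; decide
  · by_cases hA : (j : Int) + 1 = p
    · have hH : pvHf p m j = 1 := by rw [pvHf]; split_ifs <;> omega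
      have hC : pvCf p m j = "=" := by
        rw [pvCf]; split_ifs <;> first | rfl | omega | exact (False.elim ‹False›)
      have hG : pvG p m j = ("CH=" : String).toList := by
        rw [pvG, pvPiece]; split_ifs <;> first | rfl | omega | exact (False.elim ‹False›)
      rw [hH, hC, hG]; decide
    · by_cases hB : (j : Int) = p
      · have hH : pvHf p m j = 1 := by rw [pvHf]; split_ifs <;> omega
        have hC : pvCf p m j = "-" := by
          rw [pvCf]; split_ifs <;> first | rfl | omega | exact (False.elim ‹False›)
        have hG : pvG p m j = ("CH-" : String).toList := by
          rw [pvG, pvPiece]; split_ifs <;> first | rfl | omega | exact (False.elim ‹False›)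
        rw [hH, hC, hG]; decide
      · have hH : pvHf p m j = 2 := by rw [pvHf]; split_ifs <;> omega
        have hC : pvCf p m j = "-" := by
          rw [pvCf]; split_ifs <;> first | rfl | omega | exact (False.elim ‹False›)
        have hG : pvG p m j = ("CH2-" : String).toList := by
          rw [pvG, pvPiece]; split_ifs <;> first | rfl | omega | exact (False.elim ‹False›)
        rw [hH, hC, hG]; decide

lemma pvGB_last (p : Int) (m : Nat) :
    (pvRender (pvHf p m (m + 1))).toList = pvG p m (m + 1) := by
  by_cases hp : p = (m : Int) + 1
  · have hH : pvHf p m (m + 1) = 2 := by rw [pvHf]; split_ifs <;> omega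
    have hG : pvG p m (m + 1) = ("CH2" : String).toList := by
      rw [pvG]; split_ifs <;> first | rfl | omega | exact (False.elim ‹False›)
    rw [hH, hG]; decide
  · have hH : pvHf p m (m + 1) = 3 := by rw [pvHf]; split_ifs <;> omega
    have hG : pvG p m (m + 1) = ("CH3" : String).toList := by
      rw [pvG]; split_ifs <;> first | rfl | omega | exact (False.elim ‹False›)
    rw [hH, hG]; decide

-- B on n = 2+m (m ≥ 1) equals the per-carbon target
lemma pvB_char (p : Int) (m : Nat) (hm : 1 ≤ m) :
    (oHAe_create_alt (2 + (m : Int)) p).toList = ((List.range (m + 2)).map (pvG p m)).flatten := by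
  simp only [oHAe_create_alt]
  rw [if_neg (by omega : ¬ ((2:Int) + (m:Int) = 2)), if_pos (by omega : (2:Int) < 2 + (m:Int))]
  rw [show ((2:Int) + (m:Int) - 2).toNat = m by omega,
      show ((2:Int) + (m:Int) - 1).toNat = m + 1 by omega]
  rw [pvH_char p m]
  dsimp only
  have hzip : (((List.range (m + 2)).map (pvHf p m)).map pvRender).zip
        ((List.range (m + 1)).map (pvCf p m))
      = (List.range (m + 1)).map (fun j => (pvRender (pvHf p m j), pvCf p m j)) := by
    rw [show m + 2 = (m + 1) + 1 from rfl, List.range_succ, List.map_append, List.map_append]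
    conv_lhs => rw [← List.append_nil ((List.range (m + 1)).map (pvCf p m))]
    rw [List.zip_append (by simp), List.map_map, List.map_map, List.zip_map']
    simp [Function.comp_def]
  have hlastseg : (PySem.List.pyGet? (((List.range (m + 2)).map (pvHf p m)).map pvRender) (-1)).getD ""
      = pvRender (pvHf p m (m + 1)) := by
    rw [PySem.List.pyGet?_neg_one]
    rw [show m + 2 = (m + 1) + 1 from rfl, List.range_succ, List.map_append, List.map_append]
    simp [List.getLast?_append]
  rw [hzip, hlastseg, String.toList_append, PySem.Str.toList_join,
      show ("" : String).toList = ([] : List Char) from rfl, pvJoinNil]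
  rw [List.map_map, List.map_map]
  have hmids : (List.range (m + 1)).map
        ((String.toList ∘ fun sd : String × String => sd.1 ++ sd.2) ∘
          fun j => (pvRender (pvHf p m j), pvCf p m j))
      = (List.range (m + 1)).map (pvG p m) := by
    refine List.map_congr_left ?_
    intro j hj
    rw [List.mem_range] at hj
    simpa [Function.comp] using pvGB_mid p m j hj
  rw [hmids, pvGB_last]
  simp [List.range_succ, List.append_assoc]

-- ===== VERDICT (by name: the statement is the Claim_ definition above) =====
theorem oHAe_create_spec : Claim_equal_oHAe_create := by
  intro n p _
  simp only [Spec_oHAe_create]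
  by_cases hn : n = 2
  · simp [oHAe_create, oHAe_create_alt, hn]
  · by_cases h2 : n < 2
    · -- both collapse to a two-carbon molecule
      rw [oHAe_create, oHAe_create_alt, if_neg hn, if_neg hn]
      rw [PySem.List.pyRange_one_eq_nil (by omega)]
      rw [if_neg (show ¬ (2 < n) by omega)]
      by_cases hp : p = 1
      · subst hp; simp; decide
      · have hb : ¬ (1 ≤ p ∧ p ≤ (1:Int)) := by omega
        simp [hp, hb]; decide
    · obtain ⟨m, hm, rfl⟩ : ∃ m : Nat, 1 ≤ m ∧ n = 2 + (m : Int) :=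
        ⟨(n - 2).toNat, by omega, by omega⟩
      rw [← String.toList_inj, pvA_char p m hm, pvB_char p m hm]
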